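-- pv_equiv track=rewrite | github.com/heonsik/killerjeon | tools/expand_static_world.py | strip_generated
-- ===== SOURCE A (Python) =====
-- BEGIN_MARK = "<!-- BEGIN_EXPANDED_STATIC_WORLD -->"
--
-- END_MARK = "<!-- END_EXPANDED_STATIC_WORLD -->"
--
-- def strip_generated(text: str) -> str:
--     start = text.find(BEGIN_MARK)
--     end = text.find(END_MARK)
--     if start == -1 or end == -1:
--         return text
--     while start > 0:
--         line_start = text.rfind("\n", 0, start - 1) + 1
--         if text[line_start:start].strip():
--             break
--         start = line_start
--     end += len(END_MARK)
--     return text[:start] + text[end:]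
-- ===== SOURCE B (Python) =====
-- BEGIN_MARK = "<!-- BEGIN_EXPANDED_STATIC_WORLD -->"
--
-- END_MARK = "<!-- END_EXPANDED_STATIC_WORLD -->"
--
-- def strip_generated(text: str) -> str:
--     start = text.find(BEGIN_MARK)
--     end = text.find(END_MARK)
--     if start == -1 or end == -1:
--         return text
--     # one forward pass: cut the prefix into newline-terminated lines
--     lines = []
--     cur = ""
--     for ch in text[:start]:
--         cur += ch
--         if ch == "\n":
--             lines.append(cur)
--             cur = ""
--     if cur:
--         lines.append(cur)
--     # drop trailing whitespace-only lines, then reassemble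
--     while lines and lines[-1].strip() == "":
--         lines.pop()
--     return "".join(lines) + text[end + len(END_MARK):]
-- ===== Notes on version B (the rewrite author's own statement) =====
-- stated objective: alternative
-- what changed: Replaces A's backward character-offset loop of repeated rfind newline searches by a single forward pass that splits the prefix into newline-terminated lines, pops trailing whitespace-only lines from the list, and joins the survivors.
import Mathlib
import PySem

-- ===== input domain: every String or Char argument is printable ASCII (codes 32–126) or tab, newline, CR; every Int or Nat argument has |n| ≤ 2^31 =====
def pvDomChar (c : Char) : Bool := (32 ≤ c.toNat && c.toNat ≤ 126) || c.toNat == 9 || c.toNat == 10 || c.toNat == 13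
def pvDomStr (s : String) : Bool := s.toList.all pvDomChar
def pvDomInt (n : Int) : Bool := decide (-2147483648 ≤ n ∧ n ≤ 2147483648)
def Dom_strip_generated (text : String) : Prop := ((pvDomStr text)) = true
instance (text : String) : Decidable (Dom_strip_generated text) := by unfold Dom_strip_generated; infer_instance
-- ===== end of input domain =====

-- B rebuilds the kept prefix in one forward pass over a list of newline-terminated
-- lines (then pops trailing whitespace-only lines and joins), instead of A's
-- backward character-offset loop of repeated rfind('\n') calls.  Return value only.

-- ===== PORT A =====
def pvBegin : List Char := "<!-- BEGIN_EXPANDED_STATIC_WORLD -->".toList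
def pvEnd : List Char := "<!-- END_EXPANDED_STATIC_WORLD -->".toList

-- termination helpers for A's while-loop (its loop variable strictly decreases);
-- cited by name in `decreasing_by` below, so they must precede the port
theorem pvRfindGo_le (s sub : List Char) (j : Nat) : PySem.Chars.rfind.go s sub j ≤ (j : Int) := by
  induction j with
  | zero => simp only [PySem.Chars.rfind.go]; split <;> simp
  | succ k ih =>
    simp only [PySem.Chars.rfind.go]
    split
    · simp
    · exact le_trans ih (by exact_mod_cast Nat.le_succ k)

theorem pvRfind_lt_length (l : List Char) (c : Char) :
    PySem.Chars.rfind l [c] < (l.length : Int) := by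
  unfold PySem.Chars.rfind
  cases h : l.length with
  | zero =>
    have hl : l = [] := List.eq_nil_of_length_eq_zero h
    subst hl
    simp [PySem.Chars.rfind.go]
  | succ k =>
    simp only [PySem.Chars.rfind.go]
    have hdrop : List.drop (k + 1) l = [] := List.drop_eq_nil_of_le (by omega)
    rw [hdrop]
    have hp : ([c].isPrefixOf ([] : List Char)) = false := rfl
    rw [hp]
    simp only [Bool.false_eq_true, if_false]
    have := pvRfindGo_le l [c] k
    omega

-- rfind("\n", 0, e) with 0 ≤ e reads the last '\n' of the first e characters
theorem pvRfindFrom_zero (t : List Char) (e : Int) (he : 0 ≤ e) :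
    PySem.Chars.rfindFrom t ['\n'] 0 (some e) = PySem.Chars.rfind (List.take e.toNat t) ['\n'] := by
  unfold PySem.Chars.rfindFrom
  simp only [if_neg (show ¬ ((0:Int) < 0) by omega), if_neg (show ¬ (e < 0) from by omega)]
  by_cases hne : (t.length : Int) < e
  · rw [if_pos hne]
    rw [if_neg (show ¬ ((t.length : Int) < 0) by omega)]
    have h1 : List.take e.toNat t = t := List.take_of_length_le (by omega)
    have h2 : List.take (t.length : Int).toNat t = t := by simp
    rw [show ((0:Int).toNat) = 0 from rfl, List.drop_zero, h2, h1]
    split <;> omega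
  · rw [if_neg hne]
    rw [show ((0:Int).toNat) = 0 from rfl, List.drop_zero]
    split <;> omega

-- while start > 0: … ; `start` stays a nonnegative int in Python, so it is carried as a Nat
def stripLoopA (t : List Char) (start : Nat) : Nat :=
  if _h : start = 0 then start
  else
    let lineStart := PySem.Chars.rfindFrom t ['\n'] 0 (some ((start : Int) - 1)) + 1
    if PySem.Chars.strip (PySem.List.slice t (some lineStart) (some (start : Int))) ≠ [] then start
    else stripLoopA t lineStart.toNat
termination_by start
decreasing_by
  rw [pvRfindFrom_zero t ((start : Int) - 1) (by omega)]
  have h1 := pvRfind_lt_length (List.take ((start : Int) - 1).toNat t) '\n'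
  have h3 : (List.take ((start : Int) - 1).toNat t).length ≤ ((start : Int) - 1).toNat := by
    simp [List.length_take]
  omega

def strip_generated (text : String) : String :=
  let t := text.toList
  let start := PySem.Chars.find t pvBegin
  let endI := PySem.Chars.find t pvEnd
  if start = -1 ∨ endI = -1 then text
  else
    -- find returned ≥ 0 here, so carrying the loop variable as a Nat is exact
    let start' := stripLoopA t start.toNat
    String.ofList (PySem.List.slice t none (some ((start' : Nat) : Int)) ++
               PySem.List.slice t (some (endI + (pvEnd.length : Int))) none)

-- ===== PORT B =====
-- one step of the forward pass: cur += ch; if ch == '\n': lines.append(cur); cur = ''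
def lineStep (p : List (List Char) × List Char) (ch : Char) : List (List Char) × List Char :=
  if ch = '\n' then (p.1 ++ [p.2 ++ ['\n']], []) else (p.1, p.2 ++ [ch])

-- the for-loop over text[:start] followed by `if cur: lines.append(cur)`
def buildLines (pre : List Char) : List (List Char) :=
  let p := pre.foldl lineStep ([], [])
  if p.2 ≠ [] then p.1 ++ [p.2] else p.1

-- while lines and lines[-1].strip() == "": lines.pop()
def popBlank (lines : List (List Char)) : List (List Char) :=
  match _h : lines.getLast? with
  | none => lines
  | some l => if PySem.Chars.strip l = [] then popBlank lines.dropLast else lines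
termination_by lines.length
decreasing_by
  have h1 : lines ≠ [] := by intro hn; subst hn; simp at _h
  have h2 : lines.length ≠ 0 := fun hz => h1 (List.eq_nil_of_length_eq_zero hz)
  simp [List.length_dropLast]; omega

def strip_generated_alt (text : String) : String :=
  let t := text.toList
  let start := PySem.Chars.find t pvBegin
  let endI := PySem.Chars.find t pvEnd
  if start = -1 ∨ endI = -1 then text
  else
    let kept := popBlank (buildLines (PySem.List.slice t none (some start)))
    String.ofList (PySem.Chars.join [] kept ++
               PySem.List.slice t (some (endI + (pvEnd.length : Int))) none)

-- ===== PRECONDITION & SPEC =====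
def Spec_strip_generated (text : String) (out : String) : Prop := out = strip_generated_alt text
instance (text : String) (out : String) : Decidable (Spec_strip_generated text out) := by unfold Spec_strip_generated; infer_instance

-- ===== CLAIM (what is proved, stated in full; the proofs are below) =====
def Claim_equal_strip_generated : Prop := ∀ (text : String), Dom_strip_generated text → Spec_strip_generated text (strip_generated text)

-- ===== LEMMAS AND PROOFS =====

theorem pvRfindGo_ge (s sub : List Char) (j : Nat) : -1 ≤ PySem.Chars.rfind.go s sub j := by
  induction j with
  | zero => simp only [PySem.Chars.rfind.go]; split <;> omega
  | succ k ih =>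
    simp only [PySem.Chars.rfind.go]
    split
    · omega
    · exact ih

theorem pvRfind_ge (l sub : List Char) : -1 ≤ PySem.Chars.rfind l sub := pvRfindGo_ge l sub l.length

-- [c].isPrefixOf (l.drop i) is exactly "l[i] is c"
theorem pvPrefix_single (l : List Char) (c : Char) (i : Nat) :
    ([c].isPrefixOf (l.drop i)) = true ↔ l[i]? = some c := by
  rw [← List.head?_drop]
  cases h : l.drop i with
  | nil => simp [List.isPrefixOf]
  | cons a as =>
    simp only [List.isPrefixOf, List.head?_cons]
    constructor
    · intro hp
      simp only [Bool.and_eq_true, beq_iff_eq] at hp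
      rw [hp.1]
    · intro hp
      obtain rfl : a = c := by injection hp
      simp

theorem pvRfindGo_spec (l : List Char) (c : Char) (j : Nat) :
    (PySem.Chars.rfind.go l [c] j = -1 ∧ ∀ i : Nat, i ≤ j → l[i]? ≠ some c) ∨
    (∃ k : Nat, k ≤ j ∧ PySem.Chars.rfind.go l [c] j = (k : Int) ∧ l[k]? = some c ∧
      ∀ i : Nat, k < i → i ≤ j → l[i]? ≠ some c) := by
  induction j with
  | zero =>
    simp only [PySem.Chars.rfind.go]
    have hd0 : l.drop 0 = l := (List.drop_zero)
    by_cases hp : ([c].isPrefixOf l) = true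
    · right
      refine ⟨0, le_refl 0, by rw [if_pos hp]; rfl, (pvPrefix_single l c 0).mp (by rw [hd0]; exact hp), ?_⟩
      intro i h1 h2; omega
    · left
      refine ⟨by rw [if_neg hp], ?_⟩
      intro i hi
      obtain rfl : i = 0 := by omega
      exact fun hc => hp (by rw [← hd0]; exact (pvPrefix_single l c 0).mpr hc)
  | succ k ih =>
    simp only [PySem.Chars.rfind.go]
    by_cases hp : ([c].isPrefixOf (l.drop (k + 1))) = true
    · right
      refine ⟨k + 1, le_refl _, by rw [if_pos hp], (pvPrefix_single l c (k + 1)).mp hp, ?_⟩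
      intro i h1 h2; omega
    · rw [if_neg hp]
      have hnot : l[k + 1]? ≠ some c := fun hc => hp ((pvPrefix_single l c (k + 1)).mpr hc)
      rcases ih with ⟨h1, h2⟩ | ⟨m, hm1, hm2, hm3, hm4⟩
      · left
        refine ⟨h1, ?_⟩
        intro i hi
        rcases Nat.lt_or_ge i (k + 1) with h | h
        · exact h2 i (by omega)
        · obtain rfl : i = k + 1 := by omega
          exact hnot
      · right
        refine ⟨m, by omega, hm2, hm3, ?_⟩
        intro i hlt hle
        rcases Nat.lt_or_ge i (k + 1) with h | h
        · exact hm4 i hlt (by omega)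
        · obtain rfl : i = k + 1 := by omega
          exact hnot

-- rfind of a single character: −1 iff absent, else the last occurrence
theorem pvRfind_spec (l : List Char) (c : Char) :
    (PySem.Chars.rfind l [c] = -1 ∧ c ∉ l) ∨
    (∃ k : Nat, PySem.Chars.rfind l [c] = (k : Int) ∧ l[k]? = some c ∧
      ∀ i : Nat, k < i → l[i]? ≠ some c) := by
  unfold PySem.Chars.rfind
  rcases pvRfindGo_spec l c l.length with ⟨h1, h2⟩ | ⟨k, hk1, hk2, hk3, hk4⟩
  · left
    refine ⟨h1, fun hm => ?_⟩
    obtain ⟨i, hi⟩ := List.mem_iff_getElem?.mp hm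
    have hlen : i < l.length := (List.getElem?_eq_some_iff.mp hi).1
    exact h2 i (by omega) hi
  · right
    refine ⟨k, hk2, hk3, ?_⟩
    intro i hlt
    rcases Nat.lt_or_ge i l.length with h | h
    · exact hk4 i hlt (by omega)
    · rw [List.getElem?_eq_none (by omega)]
      simp

-- abstract form of A's backward loop, acting on the prefix it inspects
def trimA (pre : List Char) : List Char :=
  if h : pre = [] then pre else
    if PySem.Chars.strip (pre.drop (PySem.Chars.rfind pre.dropLast ['\n'] + 1).toNat) ≠ [] then pre
    else trimA (pre.take (PySem.Chars.rfind pre.dropLast ['\n'] + 1).toNat)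
termination_by pre.length
decreasing_by
  have h1 := pvRfind_lt_length pre.dropLast '\n'
  have h2 : pre.length ≠ 0 := fun hz => h (List.eq_nil_of_length_eq_zero hz)
  simp only [List.length_dropLast] at h1
  simp [List.length_take]
  omega

theorem pvFoldl_no_nl (u : List Char) (hn : '\n' ∉ u) (L : List (List Char)) (cur : List Char) :
    u.foldl lineStep (L, cur) = (L, cur ++ u) := by
  induction u generalizing cur with
  | nil => simp
  | cons a as ih =>
    have ha : a ≠ '\n' := by rintro rfl; exact hn List.mem_cons_self
    simp only [List.foldl_cons, lineStep, if_neg ha]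
    rw [ih (fun hm => hn (List.mem_cons_of_mem _ hm))]
    simp

theorem pvBuildLines_decomp (p b : List Char) (hp : (p.foldl lineStep ([], [])).2 = [])
    (hb : b ≠ []) (hbn : '\n' ∉ b.dropLast) :
    buildLines (p ++ b) = buildLines p ++ [b] := by
  obtain ⟨u, lc, rfl⟩ : ∃ u lc, b = u ++ [lc] := ⟨b.dropLast, b.getLast hb, (List.dropLast_concat_getLast hb).symm⟩
  rw [List.dropLast_concat] at hbn
  unfold buildLines
  rcases hL : p.foldl lineStep ([], []) with ⟨L, c⟩
  rw [hL] at hp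
  simp only at hp
  subst hp
  rw [List.foldl_append, hL]
  by_cases hlc : lc = '\n'
  · subst hlc
    rw [List.foldl_append, pvFoldl_no_nl u hbn]
    simp [lineStep]
  · have hnb : '\n' ∉ u ++ [lc] := by
      intro hm
      rcases List.mem_append.mp hm with h1 | h1
      · exact hbn h1
      · simp at h1; exact hlc h1.symm
    rw [pvFoldl_no_nl _ hnb]
    simp

theorem pvFoldl_inv (x : List Char) (L : List (List Char)) (cur : List Char) :
    (x.foldl lineStep (L, cur)).1.flatten ++ (x.foldl lineStep (L, cur)).2 = L.flatten ++ cur ++ x := by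
  induction x generalizing L cur with
  | nil => simp
  | cons a as ih =>
    simp only [List.foldl_cons, lineStep]
    by_cases ha : a = '\n'
    · subst ha
      rw [if_pos rfl, ih]
      simp
    · rw [if_neg ha, ih]
      simp

theorem pvFlatten_buildLines (x : List Char) : (buildLines x).flatten = x := by
  unfold buildLines
  have hinv := pvFoldl_inv x [] []
  simp only [List.flatten_nil, List.nil_append] at hinv
  by_cases h : (x.foldl lineStep ([], [])).2 ≠ []
  · rw [if_pos h]
    simp only [List.flatten_append, List.flatten_cons, List.flatten_nil, List.append_nil]
    exact hinv
  · rw [if_neg h]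
    rw [not_ne_iff.mp h, List.append_nil] at hinv
    exact hinv

theorem pvPopBlank_nil : popBlank [] = [] := by
  rw [popBlank]
  split
  · rfl
  · next h => simp at h

theorem pvPopBlank_concat (xs : List (List Char)) (l : List Char) :
    popBlank (xs ++ [l]) = if PySem.Chars.strip l = [] then popBlank xs else xs ++ [l] := by
  rw [popBlank]
  split
  · next h => simp at h
  · next l1 h =>
    rw [List.getLast?_concat] at h
    obtain rfl : l = l1 := by injection h
    rw [List.dropLast_concat]

theorem pvJoin_nil (ls : List (List Char)) : PySem.Chars.join [] ls = ls.flatten := by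
  unfold PySem.Chars.join
  induction ls with
  | nil => rfl
  | cons x t ih =>
    cases t with
    | nil => simp [List.intercalate]
    | cons y s => simp_all [List.intercalate, List.intersperse]

theorem pvDropLast_drop (l : List Char) (n : Nat) : (l.drop n).dropLast = l.dropLast.drop n := by
  rw [List.dropLast_eq_take, List.dropLast_eq_take, List.length_drop, List.drop_take]
  congr 1
  omega

theorem pvTrimA_nil : trimA [] = [] := by
  rw [trimA]; simp

-- B's pipeline computes exactly the prefix A's backward loop keeps
theorem pvTrimA_eq_B_aux (n : Nat) : ∀ (pre : List Char), pre.length ≤ n →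
    (popBlank (buildLines pre)).flatten = trimA pre := by
  induction n with
  | zero =>
    intro pre hl
    obtain rfl : pre = [] := List.eq_nil_of_length_eq_zero (by omega)
    rw [pvTrimA_nil]
    show (popBlank []).flatten = []
    rw [pvPopBlank_nil]; rfl
  | succ m ih =>
    intro pre hl
    by_cases hpre : pre = []
    · subst hpre
      rw [pvTrimA_nil]
      show (popBlank []).flatten = []
      rw [pvPopBlank_nil]; rfl
    rw [trimA, dif_neg hpre]
    rcases pvRfind_spec pre.dropLast '\n' with ⟨hr, hmem⟩ | ⟨k, hk, hkv, hlast⟩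
    · -- no '\n' before the last character: the prefix is a single line
      rw [hr]
      have hbl : buildLines pre = [pre] := by
        have hd := pvBuildLines_decomp [] pre (by rfl) hpre hmem
        simpa using hd
      rw [show ((-1 : Int) + 1).toNat = 0 from rfl, List.drop_zero, List.take_zero]
      rw [hbl, show ([pre] : List (List Char)) = [] ++ [pre] from rfl, pvPopBlank_concat]
      by_cases hstrip : PySem.Chars.strip pre = []
      · rw [if_pos hstrip, if_neg (fun hc => hc hstrip), pvPopBlank_nil, pvTrimA_nil]
        rfl
      · rw [if_neg hstrip, if_pos hstrip]
        simp
    · -- '\n' at position k, none later (before the last character)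
      have hklen : k < pre.dropLast.length := (List.getElem?_eq_some_iff.mp hkv).1
      have hlen2 : k + 2 ≤ pre.length := by
        rw [List.length_dropLast] at hklen; omega
      have hpk : pre[k]? = some '\n' := by
        rw [List.getElem?_dropLast] at hkv
        by_cases hc : k < pre.length - 1
        · rwa [if_pos hc] at hkv
        · rw [if_neg hc] at hkv; exact absurd hkv (by simp)
      have hls : (PySem.Chars.rfind pre.dropLast ['\n'] + 1).toNat = k + 1 := by
        rw [hk]; omega
      rw [hls]
      have hbne : pre.drop (k + 1) ≠ [] := by
        intro hc
        have := List.drop_eq_nil_iff.mp hc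
        omega
      have hbn : '\n' ∉ (pre.drop (k + 1)).dropLast := by
        rw [pvDropLast_drop]
        intro hm
        obtain ⟨j, hj⟩ := List.mem_iff_getElem?.mp hm
        rw [List.getElem?_drop] at hj
        exact hlast (k + 1 + j) (by omega) hj
      have hpend : pre.take (k + 1) = pre.take k ++ ['\n'] := by
        rw [List.take_add_one, hpk]; rfl
      have hsnd : ((pre.take (k + 1)).foldl lineStep ([], [])).2 = [] := by
        rw [hpend, List.foldl_append]
        simp [lineStep]
      have hdecomp : buildLines pre = buildLines (pre.take (k + 1)) ++ [pre.drop (k + 1)] := by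
        conv_lhs => rw [← List.take_append_drop (k + 1) pre]
        exact pvBuildLines_decomp _ _ hsnd hbne hbn
      rw [hdecomp, pvPopBlank_concat]
      by_cases hstrip : PySem.Chars.strip (pre.drop (k + 1)) = []
      · rw [if_pos hstrip, if_neg (fun hc => hc hstrip)]
        exact ih (pre.take (k + 1)) (by rw [List.length_take]; omega)
      · rw [if_neg hstrip, if_pos hstrip]
        rw [← hdecomp, pvFlatten_buildLines]

theorem pvTrimA_eq_B (pre : List Char) :
    (popBlank (buildLines pre)).flatten = trimA pre :=
  pvTrimA_eq_B_aux pre.length pre (le_refl _)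

-- A's loop, run on the whole text, keeps exactly trimA of the prefix it inspects
theorem pvStripLoopA_eq_trimA_aux (t : List Char) (n : Nat) : ∀ (s : Nat), s ≤ n → s ≤ t.length →
    List.take (stripLoopA t s) t = trimA (List.take s t) := by
  induction n with
  | zero =>
    intro s hn _
    obtain rfl : s = 0 := by omega
    rw [stripLoopA, dif_pos rfl, List.take_zero, pvTrimA_nil]
  | succ m ih =>
    intro s hn hs
    by_cases hs0 : s = 0
    · subst hs0
      rw [stripLoopA, dif_pos rfl, List.take_zero, pvTrimA_nil]
    have hlen : (List.take s t).length = s := by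
      rw [List.length_take]; omega
    have hne : List.take s t ≠ [] := by
      intro hc
      rw [hc] at hlen
      simp at hlen
      omega
    have htn : ((s : Int) - 1).toNat = s - 1 := by omega
    have hdl : (List.take s t).dropLast = List.take (s - 1) t := by
      rw [List.dropLast_eq_take, hlen, List.take_take]
      congr 1
      omega
    have hE : PySem.Chars.rfindFrom t ['\n'] 0 (some ((s : Int) - 1)) + 1
        = PySem.Chars.rfind (List.take (s - 1) t) ['\n'] + 1 := by
      rw [pvRfindFrom_zero t ((s : Int) - 1) (by omega), htn]
    have hge := pvRfind_ge (List.take (s - 1) t) ['\n']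
    have hlt := pvRfind_lt_length (List.take (s - 1) t) '\n'
    have hlt' : PySem.Chars.rfind (List.take (s - 1) t) ['\n'] < (s : Int) - 1 := by
      have : (List.take (s - 1) t).length ≤ s - 1 := by
        rw [List.length_take]; omega
      omega
    rw [stripLoopA, dif_neg hs0, hE]
    show List.take
        (if PySem.Chars.strip (PySem.List.slice t
              (some (PySem.Chars.rfind (List.take (s - 1) t) ['\n'] + 1)) (some (s : Int))) ≠ [] then s
         else stripLoopA t (PySem.Chars.rfind (List.take (s - 1) t) ['\n'] + 1).toNat) t
      = trimA (List.take s t)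
    have hslice : PySem.List.slice t
          (some (PySem.Chars.rfind (List.take (s - 1) t) ['\n'] + 1)) (some (s : Int))
        = (List.take s t).drop (PySem.Chars.rfind (List.take (s - 1) t) ['\n'] + 1).toNat := by
      rw [show PySem.Chars.rfind (List.take (s - 1) t) ['\n'] + 1
            = (((PySem.Chars.rfind (List.take (s - 1) t) ['\n'] + 1).toNat : Nat) : Int) by omega,
          PySem.List.slice_natCast, List.drop_take]
      simp only [Int.toNat_natCast]
    rw [trimA, dif_neg hne, hdl, hslice]
    by_cases hstrip : PySem.Chars.strip
        ((List.take s t).drop (PySem.Chars.rfind (List.take (s - 1) t) ['\n'] + 1).toNat) ≠ []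
    · rw [if_pos hstrip, if_pos hstrip]
    · rw [if_neg hstrip, if_neg hstrip]
      rw [List.take_take, show min (PySem.Chars.rfind (List.take (s - 1) t) ['\n'] + 1).toNat s
            = (PySem.Chars.rfind (List.take (s - 1) t) ['\n'] + 1).toNat by omega]
      exact ih (PySem.Chars.rfind (List.take (s - 1) t) ['\n'] + 1).toNat (by omega) (by omega)

theorem pvStripLoopA_eq_trimA (t : List Char) (s : Nat) (hs : s ≤ t.length) :
    List.take (stripLoopA t s) t = trimA (List.take s t) :=
  pvStripLoopA_eq_trimA_aux t s s (le_refl _) hs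

-- ===== VERDICT (by name: the statement is the Claim_ definition above) =====
theorem strip_generated_spec : Claim_equal_strip_generated := by
  intro text _
  unfold Spec_strip_generated strip_generated strip_generated_alt
  simp only []
  by_cases h : PySem.Chars.find text.toList pvBegin = -1 ∨ PySem.Chars.find text.toList pvEnd = -1
  · rw [if_pos h, if_pos h]
  · rw [if_neg h, if_neg h]
    have h0 : 0 ≤ PySem.Chars.find text.toList pvBegin := by
      have := PySem.Chars.neg_one_le_find text.toList pvBegin
      have h1 : PySem.Chars.find text.toList pvBegin ≠ -1 := fun hc => h (Or.inl hc)
      omega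
    have hle : (PySem.Chars.find text.toList pvBegin).toNat ≤ text.toList.length := by
      have := PySem.Chars.find_le_length text.toList pvBegin
      omega
    congr 1
    rw [PySem.List.slice_to _ (by omega : (0:Int) ≤ ((stripLoopA text.toList (PySem.Chars.find text.toList pvBegin).toNat : Nat) : Int))]
    rw [PySem.List.slice_to _ h0]
    rw [pvJoin_nil, pvTrimA_eq_B, Int.toNat_natCast]
    rw [pvStripLoopA_eq_trimA text.toList _ hle]
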